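-- pv_equiv track=rewrite | github.com/malcolmsailor/music_df | music_df/add_feature.py | _time_signature_reduce
-- ===== SOURCE A (Python) =====
-- def _time_signature_reduce(
--     numerator, denominator, max_ts_denominator: int = 6, max_notes_per_bar: int = 2
-- ):
--     # from MusicBERT
--
--     # reduction (when denominator is too large)
--     while (
--         denominator > 2**max_ts_denominator
--         and denominator % 2 == 0
--         and numerator % 2 == 0
--     ):
--         denominator //= 2
--         numerator //= 2
--     # decomposition (when length of a bar exceed max_notes_per_bar)
--     while numerator > max_notes_per_bar * denominator:
--         for i in range(2, numerator + 1):
--             if numerator % i == 0: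
--                 numerator //= i
--                 break
--     return numerator, denominator
-- ===== SOURCE B (Python) =====
-- def _time_signature_reduce(
--     numerator, denominator, max_ts_denominator: int = 6, max_notes_per_bar: int = 2
-- ):
--     # reduction (when denominator is too large) -- same halving loop as the original
--     while (
--         denominator > 2**max_ts_denominator
--         and denominator % 2 == 0
--         and numerator % 2 == 0
--     ):
--         denominator //= 2
--         numerator //= 2
--     # decomposition: factorize numerator once (primes in ascending order), then
--     # consume factors until the bar is short enough
--     if numerator > max_notes_per_bar * denominator:
--         factors = []
--         n, p = numerator, 2
--         while p * p <= n:
--             while n % p == 0: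
--                 factors.append(p)
--                 n //= p
--             p += 1
--         if n > 1:
--             factors.append(n)
--         for p in factors:
--             if numerator <= max_notes_per_bar * denominator:
--                 break
--             numerator //= p
--     return numerator, denominator
-- ===== Notes on version B (the rewrite author's own statement) =====
-- stated objective: faster
-- what changed: The decomposition while-loop, which rescans range(2, numerator+1) for the smallest divisor on every iteration, is replaced by one sqrt-bounded trial-division factorization of numerator into an ascending prime list that is then consumed in order until numerator <= max_notes_per_bar*denominator; the halving loop is kept.
import Mathlib
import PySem

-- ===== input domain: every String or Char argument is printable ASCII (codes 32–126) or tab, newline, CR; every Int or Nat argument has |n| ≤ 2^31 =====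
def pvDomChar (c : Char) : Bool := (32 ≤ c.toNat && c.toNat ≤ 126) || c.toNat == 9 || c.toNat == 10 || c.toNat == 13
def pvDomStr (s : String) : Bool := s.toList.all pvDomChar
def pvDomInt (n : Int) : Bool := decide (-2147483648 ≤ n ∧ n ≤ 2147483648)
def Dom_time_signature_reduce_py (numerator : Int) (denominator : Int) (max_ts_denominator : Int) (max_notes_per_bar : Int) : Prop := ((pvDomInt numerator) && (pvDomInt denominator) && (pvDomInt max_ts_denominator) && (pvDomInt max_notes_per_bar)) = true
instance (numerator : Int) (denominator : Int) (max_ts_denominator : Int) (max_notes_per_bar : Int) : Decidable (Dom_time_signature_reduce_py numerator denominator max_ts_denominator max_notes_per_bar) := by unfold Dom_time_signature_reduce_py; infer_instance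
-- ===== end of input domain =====

-- B replaces A's per-iteration smallest-divisor rescan by one trial-division factorization of the
-- numerator, whose ascending prime factors are then consumed in order (objective: faster).

-- ===== PORT A =====

-- `denominator > 2**max_ts_denominator`, exact on Dom (|denominator| ≤ 2^31):
-- for 0 ≤ max_ts_denominator ≤ 31 the power is computed; for max_ts_denominator ≥ 32 the
-- comparison is false for every |d| ≤ 2^31 (so the power need not be materialized); for a
-- negative exponent Python compares d with the float 2**m ∈ (0,1), which on integers is 1 ≤ d.
def tsrPowLt (d m : Int) : Bool :=
  if 0 ≤ m then (if m ≤ 31 then decide ((2:Int) ^ m.toNat < d) else false)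
  else decide (1 ≤ d)

theorem tsrPowLt_one_le (d m : Int) (h : tsrPowLt d m = true) : 1 ≤ d := by
  unfold tsrPowLt at h
  by_cases h0 : 0 ≤ m
  · simp only [if_pos h0] at h
    by_cases h1 : m ≤ 31
    · simp only [if_pos h1, decide_eq_true_eq] at h
      have hp : (0:Int) < 2 ^ m.toNat := pow_pos (by norm_num) _
      omega
    · simp [h1] at h
  · simp only [if_neg h0, decide_eq_true_eq] at h
    exact h

-- the reduction (halving) while-loop, identical in A and B
def tsrHalve (n d m : Int) : Int × Int :=
  if h : (tsrPowLt d m && (PySem.Int.mod d 2 == 0) && (PySem.Int.mod n 2 == 0)) = true then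
    tsrHalve (PySem.Int.floordiv n 2) (PySem.Int.floordiv d 2) m
  else (n, d)
termination_by d.toNat
decreasing_by
  simp only [Bool.and_eq_true, beq_iff_eq] at h
  have hd1 : 1 ≤ d := tsrPowLt_one_le d m h.1.1
  rw [PySem.Int.floordiv_eq_ediv_of_pos (by norm_num : (0:Int) < 2)]
  omega

-- `for i in range(2, numerator + 1): if numerator % i == 0: break` — first divisor from i up
def tsrFind (n i : Int) : Option Int :=
  if h : i ≤ n then
    if PySem.Int.mod n i == 0 then some i else tsrFind n (i + 1)
  else none
termination_by (n + 1 - i).toNat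
decreasing_by omega

theorem tsrFind_bounds (n i j : Int) (h : tsrFind n i = some j) :
    i ≤ j ∧ j ≤ n ∧ PySem.Int.mod n j = 0 := by
  fun_induction tsrFind n i with
  | case1 i hle hdvd =>
      simp only [Option.some.injEq] at h
      subst h
      exact ⟨le_refl _, hle, by simpa using hdvd⟩
  | case2 i hle hdvd ih =>
      obtain ⟨h1, h2, h3⟩ := ih h
      exact ⟨by omega, h2, h3⟩
  | case3 i hle => simp at h

-- A's decomposition while-loop
def tsrLoop (n M : Int) : Int :=
  if M < n then
    match hf : tsrFind n 2 with
    | some i => tsrLoop (PySem.Int.floordiv n i) M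
    | none => n
  else n
termination_by n.toNat
decreasing_by
  obtain ⟨h2, hn, _⟩ := tsrFind_bounds n 2 i hf
  rw [PySem.Int.floordiv_eq_ediv_of_pos (by omega : (0:Int) < i)]
  have hge : 0 ≤ n / i := Int.ediv_nonneg (by omega) (by omega)
  have hmul : (n / i) * i ≤ n := Int.ediv_mul_le n (by omega)
  have h2 : 2 * (n / i) ≤ n := by nlinarith
  omega

def time_signature_reduce_py (numerator : Int) (denominator : Int) (max_ts_denominator : Int) (max_notes_per_bar : Int) : Int × Int :=
  let nd := tsrHalve numerator denominator max_ts_denominator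
  (tsrLoop nd.1 (max_notes_per_bar * nd.2), nd.2)

-- ===== PORT B =====

-- trial-division factorization of n into ascending primes (Source B's first inner loop);
-- the `2 ≤ p` conjunct is a totality guard only: every call starts at p = 2 and p only grows
def tsrFactorize (p n : Int) : List Int :=
  if h : 2 ≤ p ∧ p * p ≤ n then
    if PySem.Int.mod n p == 0 then p :: tsrFactorize p (PySem.Int.floordiv n p)
    else tsrFactorize (p + 1) n
  else if 1 < n then [n] else []
termination_by (2 * n - p).toNat
decreasing_by
  · obtain ⟨hp, hpn⟩ := h
    rw [PySem.Int.floordiv_eq_ediv_of_pos (by omega : (0:Int) < p)]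
    have hn4 : 4 ≤ n := by nlinarith
    have hge : 0 ≤ n / p := Int.ediv_nonneg (by omega) (by omega)
    have hmul : (n / p) * p ≤ n := Int.ediv_mul_le n (by omega)
    have h2 : 2 * (n / p) ≤ n := by nlinarith
    have hpn' : p ≤ n := by nlinarith
    omega
  · obtain ⟨hp, hpn⟩ := h
    have : 2 * p ≤ p * p := by nlinarith
    omega

-- `for p in factors: if numerator <= M: break; numerator //= p`
def tsrConsume (L : List Int) (n M : Int) : Int :=
  match L with
  | [] => n
  | p :: ps => if n ≤ M then n else tsrConsume ps (PySem.Int.floordiv n p) M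

def time_signature_reduce_py_alt (numerator : Int) (denominator : Int) (max_ts_denominator : Int) (max_notes_per_bar : Int) : Int × Int :=
  let nd := tsrHalve numerator denominator max_ts_denominator
  if max_notes_per_bar * nd.2 < nd.1 then
    (tsrConsume (tsrFactorize 2 nd.1) nd.1 (max_notes_per_bar * nd.2), nd.2)
  else nd

-- ===== PRECONDITION & SPEC =====
-- Pre_ excludes exactly the inputs on which Python A never returns: when
-- numerator > max_notes_per_bar*denominator and max_notes_per_bar*denominator < 1, A's second
-- while-loop eventually reaches a numerator with no divisor in range(2, numerator+1) and spins forever.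
def Pre_time_signature_reduce_py (numerator : Int) (denominator : Int) (max_ts_denominator : Int) (max_notes_per_bar : Int) : Prop :=
  numerator ≤ max_notes_per_bar * denominator ∨ 1 ≤ max_notes_per_bar * denominator
instance (numerator : Int) (denominator : Int) (max_ts_denominator : Int) (max_notes_per_bar : Int) : Decidable (Pre_time_signature_reduce_py numerator denominator max_ts_denominator max_notes_per_bar) := by unfold Pre_time_signature_reduce_py; infer_instance

def pvWitness_time_signature_reduce_py : Int × Int × Int × Int := (6, 8, 2, 2)

def Spec_time_signature_reduce_py (numerator : Int) (denominator : Int) (max_ts_denominator : Int) (max_notes_per_bar : Int) (out : Int × Int) : Prop := out = time_signature_reduce_py_alt numerator denominator max_ts_denominator max_notes_per_bar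
instance (numerator : Int) (denominator : Int) (max_ts_denominator : Int) (max_notes_per_bar : Int) (out : Int × Int) : Decidable (Spec_time_signature_reduce_py numerator denominator max_ts_denominator max_notes_per_bar out) := by unfold Spec_time_signature_reduce_py; infer_instance

-- ===== CLAIM (what is proved, stated in full; the proofs are below) =====
def Claim_equal_time_signature_reduce_py : Prop := ∀ (numerator : Int) (denominator : Int) (max_ts_denominator : Int) (max_notes_per_bar : Int), Dom_time_signature_reduce_py numerator denominator max_ts_denominator max_notes_per_bar → Pre_time_signature_reduce_py numerator denominator max_ts_denominator max_notes_per_bar → Spec_time_signature_reduce_py numerator denominator max_ts_denominator max_notes_per_bar (time_signature_reduce_py numerator denominator max_ts_denominator max_notes_per_bar)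

-- ===== LEMMAS AND PROOFS =====

-- the halving loop divides numerator and denominator by the same power of two, exactly
theorem tsrHalve_pow (n d m : Int) :
    ∃ k : ℕ, n = (tsrHalve n d m).1 * 2 ^ k ∧ d = (tsrHalve n d m).2 * 2 ^ k := by
  fun_induction tsrHalve n d m with
  | case1 n d h ih =>
      obtain ⟨k, h1, h2⟩ := ih
      simp only [Bool.and_eq_true, beq_iff_eq] at h
      obtain ⟨⟨_, hd2⟩, hn2⟩ := h
      have hdd : (2:Int) ∣ d := (PySem.Int.mod_eq_zero_iff_dvd d 2).mp hd2
      have hdn : (2:Int) ∣ n := (PySem.Int.mod_eq_zero_iff_dvd n 2).mp hn2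
      have e1 : PySem.Int.floordiv n 2 = n / 2 := PySem.Int.floordiv_eq_ediv_of_pos (by norm_num)
      have e2 : PySem.Int.floordiv d 2 = d / 2 := PySem.Int.floordiv_eq_ediv_of_pos (by norm_num)
      rw [e1, e2] at h1 h2 ⊢
      refine ⟨k + 1, ?_, ?_⟩
      · have : n / 2 * 2 = n := Int.ediv_mul_cancel hdn
        rw [pow_succ, ← mul_assoc, ← h1, this]
      · have : d / 2 * 2 = d := Int.ediv_mul_cancel hdd
        rw [pow_succ, ← mul_assoc, ← h2, this]
  | case2 n d h =>
      exact ⟨0, by simp⟩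

-- tsrFind finds the least divisor ≥ 2, i.e. the least prime factor
theorem tsrFind_minFac (n : Int) (hn : 2 ≤ n) (i : Int) :
    2 ≤ i → i ≤ (n.toNat.minFac : Int) → tsrFind n i = some ((n.toNat.minFac : Nat) : Int) := by
  fun_induction tsrFind n i with
  | case1 i hin hdvd =>
      intro hi hle
      have hdvd' : i ∣ n := by
        rw [beq_iff_eq] at hdvd
        exact (PySem.Int.mod_eq_zero_iff_dvd n i).mp hdvd
      have hdn : i.toNat ∣ n.toNat := by
        have h1 : ((i.toNat : Nat) : Int) ∣ ((n.toNat : Nat) : Int) := by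
          rwa [Int.toNat_of_nonneg (by omega), Int.toNat_of_nonneg (by omega)]
        exact_mod_cast h1
      have hmf : n.toNat.minFac ≤ i.toNat := Nat.minFac_le_of_dvd (by omega) hdn
      have he : i = ((n.toNat.minFac : Nat) : Int) := by omega
      rw [he]
  | case2 i hin hdvd ih =>
      intro hi hle
      have hmfd : n.toNat.minFac ∣ n.toNat := Nat.minFac_dvd _
      have hlt : i < ((n.toNat.minFac : Nat) : Int) := by
        rcases lt_or_eq_of_le hle with h | h
        · exact h
        · exfalso
          apply hdvd
          rw [beq_iff_eq, h]
          apply (PySem.Int.mod_eq_zero_iff_dvd _ _).mpr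
          have h2 : ((n.toNat.minFac : Nat) : Int) ∣ ((n.toNat : Nat) : Int) :=
            Int.natCast_dvd_natCast.mpr hmfd
          rwa [Int.toNat_of_nonneg (by omega)] at h2
      exact ih (by omega) (by omega)
  | case3 i hin =>
      intro hi hle
      have := Nat.minFac_le (show 0 < n.toNat by omega)
      omega

theorem primeFactorsList_cons_of_two_le (n : ℕ) (h : 2 ≤ n) :
    n.primeFactorsList = n.minFac :: (n / n.minFac).primeFactorsList := by
  obtain ⟨k, rfl⟩ : ∃ k, n = k + 2 := ⟨n - 2, by omega⟩
  rw [Nat.primeFactorsList]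

-- tsrFactorize produces exactly Nat.primeFactorsList (ascending primes with multiplicity)
theorem tsrFactorize_eq (p n : Int) :
    2 ≤ p → 1 ≤ n → (∀ k : ℕ, 2 ≤ k → (k : Int) < p → ¬ (k ∣ n.toNat)) →
    tsrFactorize p n = (n.toNat.primeFactorsList).map (fun x : Nat => (x : Int)) := by
  fun_induction tsrFactorize p n with
  | case1 p n h hdvd ih =>
      intro hp hn hnd
      obtain ⟨h2p, hppn⟩ := h
      have hn4 : 4 ≤ n := by nlinarith
      have hpd : p ∣ n := by
        rw [beq_iff_eq] at hdvd
        exact (PySem.Int.mod_eq_zero_iff_dvd n p).mp hdvd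
      have hpdn : p.toNat ∣ n.toNat := by
        have h1 : ((p.toNat : Nat) : Int) ∣ ((n.toNat : Nat) : Int) := by
          rwa [Int.toNat_of_nonneg (by omega), Int.toNat_of_nonneg (by omega)]
        exact_mod_cast h1
      have hmfle : n.toNat.minFac ≤ p.toNat := Nat.minFac_le_of_dvd (by omega) hpdn
      have hmf2 : 2 ≤ n.toNat.minFac := (Nat.minFac_prime (by omega)).two_le
      have hmfeq : n.toNat.minFac = p.toNat := by
        by_contra hne
        exact hnd n.toNat.minFac hmf2 (by omega) (Nat.minFac_dvd _)
      have hfd : PySem.Int.floordiv n p = ((n.toNat / p.toNat : Nat) : Int) := by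
        conv_lhs => rw [show n = ((n.toNat : Nat) : Int) from (Int.toNat_of_nonneg (by omega)).symm,
          show p = ((p.toNat : Nat) : Int) from (Int.toNat_of_nonneg (by omega)).symm]
        exact PySem.Int.floordiv_natCast n.toNat p.toNat
      have hpn : p ≤ n := by nlinarith
      have hq1 : 1 ≤ n.toNat / p.toNat := (Nat.one_le_div_iff (by omega)).mpr (by omega)
      have hqd : n.toNat / p.toNat ∣ n.toNat := Nat.div_dvd_of_dvd hpdn
      rw [hfd]
      rw [primeFactorsList_cons_of_two_le n.toNat (by omega), hmfeq]
      rw [List.map_cons]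
      refine congrArg₂ _ (by omega) ?_
      rw [hfd] at ih
      rw [ih (by omega) (by exact_mod_cast hq1) ?_]
      · rw [Int.toNat_natCast]
      · intro k hk hkp hkd
        rw [Int.toNat_natCast] at hkd
        exact hnd k hk hkp (hkd.trans hqd)
  | case2 p n h hdvd ih =>
      intro hp hn hnd
      refine ih (by omega) hn ?_
      intro k hk hkp hkd
      by_cases hlt : (k : Int) < p
      · exact hnd k hk hlt hkd
      · apply hdvd
        have hkp' : (k : Int) = p := by omega
        rw [beq_iff_eq]
        apply (PySem.Int.mod_eq_zero_iff_dvd _ _).mpr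
        have h2 : ((k : Nat) : Int) ∣ ((n.toNat : Nat) : Int) := Int.natCast_dvd_natCast.mpr hkd
        rwa [Int.toNat_of_nonneg (by omega), hkp'] at h2
  | case3 p n h h1 =>
      intro hp hn hnd
      have hnp : n < p * p := by
        by_contra hc
        exact h ⟨hp, by omega⟩
      have hprime : Nat.Prime n.toNat := by
          by_contra hnpr
          have hsq := Nat.minFac_sq_le_self (show 0 < n.toNat by omega) hnpr
          have hmf2 : 2 ≤ n.toNat.minFac := (Nat.minFac_prime (by omega)).two_le
          have hcast : ((n.toNat.minFac * n.toNat.minFac : Nat) : Int) ≤ n := by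
            have hsq' : n.toNat.minFac * n.toNat.minFac ≤ n.toNat := by nlinarith [hsq]
            calc ((n.toNat.minFac * n.toNat.minFac : Nat) : Int) ≤ ((n.toNat : Nat) : Int) := by
                  exact_mod_cast hsq'
              _ = n := Int.toNat_of_nonneg (by omega)
          have hlt : ((n.toNat.minFac : Nat) : Int) < p := by
            push_cast at hcast
            nlinarith
          exact hnd _ hmf2 hlt (Nat.minFac_dvd _)
      rw [Nat.primeFactorsList_prime hprime, List.map_singleton,
        Int.toNat_of_nonneg (by omega)]
  | case4 p n h h1 =>
      intro hp hn hnd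
      have hn1 : n = 1 := by omega
      subst hn1
      simp

theorem tsrConsume_of_le (L : List Int) (n M : Int) (h : n ≤ M) : tsrConsume L n M = n := by
  cases L with
  | nil => rfl
  | cons p ps => simp [tsrConsume, h]

-- core: A's repeated smallest-divisor division equals consuming the ascending factor list
theorem tsrLoop_eq_consume (n M : Int) (hM : 1 ≤ M) :
    tsrLoop n M = tsrConsume (tsrFactorize 2 n) n M := by
  by_cases hc : M < n
  · have hn2 : 2 ≤ n := by omega
    have hmf2 : 2 ≤ n.toNat.minFac := (Nat.minFac_prime (by omega)).two_le
    have hmfle : n.toNat.minFac ≤ n.toNat := Nat.minFac_le (by omega)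
    have hfind := tsrFind_minFac n hn2 2 (by norm_num) (by exact_mod_cast hmf2)
    have hfac := tsrFactorize_eq 2 n (le_refl 2) (by omega) (by intro k hk hkp; omega)
    have hfd : PySem.Int.floordiv n ((n.toNat.minFac : Nat) : Int)
        = ((n.toNat / n.toNat.minFac : Nat) : Int) := by
      conv_lhs => rw [show n = ((n.toNat : Nat) : Int) from (Int.toNat_of_nonneg (by omega)).symm]
      exact PySem.Int.floordiv_natCast n.toNat n.toNat.minFac
    have hqlt : n.toNat / n.toNat.minFac < n.toNat := Nat.div_lt_self (by omega) (by omega)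
    have hq1 : 1 ≤ n.toNat / n.toNat.minFac := (Nat.one_le_div_iff (by omega)).mpr hmfle
    rw [tsrLoop, if_pos hc]
    rw [hfac, primeFactorsList_cons_of_two_le n.toNat (by omega), List.map_cons, tsrConsume]
    rw [if_neg (by omega : ¬ n ≤ M)]
    split
    next i hf =>
      rw [hfind] at hf
      injection hf with hf
      subst hf
      rw [hfd]
      rw [tsrLoop_eq_consume ((n.toNat / n.toNat.minFac : Nat) : Int) M hM]
      rw [tsrFactorize_eq 2 _ (le_refl 2) (by exact_mod_cast hq1) (by intro k hk hkp; omega)]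
      rw [Int.toNat_natCast]
    next hf =>
      rw [hfind] at hf
      simp at hf
  · rw [tsrLoop]
    rw [if_neg hc]
    exact (tsrConsume_of_le _ _ _ (by omega)).symm
termination_by n.toNat
decreasing_by
  have : (((n.toNat / n.toNat.minFac : Nat) : Int)).toNat = n.toNat / n.toNat.minFac :=
    Int.toNat_natCast _
  omega

-- ===== VERDICT (by name: the statement is the Claim_ definition above) =====
theorem time_signature_reduce_py_spec : Claim_equal_time_signature_reduce_py := by
  intro num den mts mnpb _hdom hpre
  unfold Spec_time_signature_reduce_py time_signature_reduce_py time_signature_reduce_py_alt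
  obtain ⟨k, hn, hd⟩ := tsrHalve_pow num den mts
  set nd := tsrHalve num den mts with hnd
  have hpow : (0:Int) < 2 ^ k := pow_pos (by norm_num) _
  have hpre' : nd.1 ≤ mnpb * nd.2 ∨ 1 ≤ mnpb * nd.2 := by
    rcases hpre with h | h
    · left
      rw [hn, hd] at h
      nlinarith
    · right
      rw [hd] at h
      nlinarith
  by_cases hc : mnpb * nd.2 < nd.1
  · have hM : 1 ≤ mnpb * nd.2 := by
      rcases hpre' with h | h
      · omega
      · exact h
    simp only [hc, if_pos]
    rw [tsrLoop_eq_consume nd.1 (mnpb * nd.2) hM]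
  · simp only [if_neg hc]
    rw [tsrLoop]
    simp [hc]
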